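-- pv_equiv track=rewrite | github.com/pet121/atlassian-marketplace-scraper | scraper/description_downloader.py | _pick_version
-- ===== SOURCE A (Python) =====
-- from typing import Dict, Optional, Tuple, List, Union, Union
--
-- def _pick_version(versions: List[Dict], wanted: Optional[str] = None) -> Optional[Dict]:
--     """Pick version from list."""
--     if not versions:
--         return None
--     if not wanted:
--         return versions[0]
--     target = wanted.strip().lower()
--     for entry in versions:
--         if (entry.get("name") or "").strip().lower() == target:
--             return entry
--     for entry in versions:
--         if (entry.get("name") or "").strip().lower().startswith(target):
--             return entry
--     return None
-- ===== SOURCE B (Python) =====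
-- from typing import Dict, Optional, List
--
-- def _pick_version(versions: List[Dict], wanted: Optional[str] = None) -> Optional[Dict]:
--     """Pick version from list: exact normalized name match wins, else first prefix match."""
--     if not versions:
--         return None
--     if not wanted:
--         return versions[0]
--     target = wanted.strip().lower()
--     exact = None
--     prefix = None
--     for entry in versions:
--         name = (entry.get("name") or "").strip().lower()
--         if exact is None and name == target:
--             exact = entry
--         if prefix is None and name.startswith(target):
--             prefix = entry
--     return exact if exact is not None else prefix
-- ===== Notes on version B (the rewrite author's own statement) =====
-- stated objective: alternative
-- what changed: A scans the list twice (one pass for exact matches, a second full pass for prefix matches); B makes a single pass recording the first exact and the first prefix candidate independently and resolves the priority after the loop.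
import Mathlib
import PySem

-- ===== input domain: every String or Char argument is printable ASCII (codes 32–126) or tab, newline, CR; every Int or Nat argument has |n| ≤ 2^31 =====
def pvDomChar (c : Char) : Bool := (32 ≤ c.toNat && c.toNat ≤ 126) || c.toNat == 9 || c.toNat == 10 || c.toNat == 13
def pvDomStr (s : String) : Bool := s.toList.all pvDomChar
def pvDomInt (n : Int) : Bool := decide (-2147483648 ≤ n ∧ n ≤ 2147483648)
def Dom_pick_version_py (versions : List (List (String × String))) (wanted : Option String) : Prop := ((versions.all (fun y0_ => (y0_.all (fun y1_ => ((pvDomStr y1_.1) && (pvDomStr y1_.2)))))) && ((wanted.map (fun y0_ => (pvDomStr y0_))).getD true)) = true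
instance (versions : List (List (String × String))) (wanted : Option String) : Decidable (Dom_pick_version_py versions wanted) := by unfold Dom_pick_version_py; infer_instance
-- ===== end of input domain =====

-- ===== PORT A =====
-- B changes A's two full scans into one pass with two candidate slots (objective: alternative single-pass decomposition, same cost).
-- normalized name: (entry.get("name") or "").strip().lower()
def pvNorm (entry : List (String × String)) : String :=
  PySem.Str.lower (PySem.Str.strip ((PySem.Dict.mk entry).getD "name" ""))

-- first loop of A: return entry whose normalized name equals target
def pvFindExact (target : String) : List (List (String × String)) → Option (List (String × String))
  | [] => none
  | e :: rest => if pvNorm e == target then some e else pvFindExact target rest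

-- second loop of A: return entry whose normalized name starts with target
def pvFindPrefix (target : String) : List (List (String × String)) → Option (List (String × String))
  | [] => none
  | e :: rest => if PySem.Str.startswith (pvNorm e) target then some e else pvFindPrefix target rest

def pick_version_py (versions : List (List (String × String))) (wanted : Option String) : Option (List (String × String)) :=
  match versions with
  | [] => none
  | v0 :: _ =>
    match wanted with
    | none => some v0
    | some w =>
      if w == "" then some v0
      else
        let target := PySem.Str.lower (PySem.Str.strip w)
        match pvFindExact target versions with
        | some e => some e
        | none => pvFindPrefix target versions

-- ===== PORT B =====
-- single pass keeping the first exact and first prefix candidates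
def pvLoopB (target : String) (exact prefx : Option (List (String × String))) :
    List (List (String × String)) → Option (List (String × String))
  | [] => match exact with
          | some e => some e
          | none => prefx
  | e :: rest =>
    let name := pvNorm e
    let exact' := if exact.isNone && (name == target) then some e else exact
    let prefx' := if prefx.isNone && PySem.Str.startswith name target then some e else prefx
    pvLoopB target exact' prefx' rest

def pick_version_py_alt (versions : List (List (String × String))) (wanted : Option String) : Option (List (String × String)) :=
  match versions with
  | [] => none
  | v0 :: _ =>
    match wanted with
    | none => some v0
    | some w =>
      if w == "" then some v0
      else pvLoopB (PySem.Str.lower (PySem.Str.strip w)) none none versions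

-- ===== PRECONDITION & SPEC =====
def Spec_pick_version_py (versions : List (List (String × String))) (wanted : Option String) (out : Option (List (String × String))) : Prop := out = pick_version_py_alt versions wanted
instance (versions : List (List (String × String))) (wanted : Option String) (out : Option (List (String × String))) : Decidable (Spec_pick_version_py versions wanted out) := by unfold Spec_pick_version_py; infer_instance

-- ===== CLAIM =====
def Claim_equal_pick_version_py : Prop := ∀ (versions : List (List (String × String))) (wanted : Option String), Dom_pick_version_py versions wanted → Spec_pick_version_py versions wanted (pick_version_py versions wanted)

-- ===== LEMMAS AND PROOFS =====
theorem pvLoopB_some (t : String) (e p : Option (List (String × String))) (l : List (List (String × String)))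
    (he : e.isSome) : pvLoopB t e p l = e := by
  induction l generalizing p with
  | nil => cases e with
    | none => simp at he
    | some x => simp [pvLoopB]
  | cons a rest ih =>
    cases e with
    | none => simp at he
    | some x =>
      simp only [pvLoopB, Option.isNone_some, Bool.false_and]
      exact ih _

theorem pvLoopB_none_some (t : String) (q : List (String × String)) (l : List (List (String × String))) :
    pvLoopB t none (some q) l = match pvFindExact t l with
      | some e => some e
      | none => some q := by
  induction l with
  | nil => simp [pvLoopB, pvFindExact]
  | cons a rest ih =>
    by_cases h : pvNorm a == t
    · simp [pvLoopB, pvFindExact, h, pvLoopB_some]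
    · simp [pvLoopB, pvFindExact, h, ih]

theorem pvLoopB_none_none (t : String) (l : List (List (String × String))) :
    pvLoopB t none none l = match pvFindExact t l with
      | some e => some e
      | none => pvFindPrefix t l := by
  induction l with
  | nil => simp [pvLoopB, pvFindExact, pvFindPrefix]
  | cons a rest ih =>
    by_cases h : pvNorm a == t
    · by_cases hp : PySem.Chars.startswith (pvNorm a).toList t.toList
      · simp [pvLoopB, pvFindExact, h, hp, pvLoopB_some]
      · simp [pvLoopB, pvFindExact, h, hp, pvLoopB_some]

    · by_cases hp : PySem.Chars.startswith (pvNorm a).toList t.toList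
      · simp [pvLoopB, pvFindExact, pvFindPrefix, h, hp, pvLoopB_none_some]
      · simp [pvLoopB, pvFindExact, pvFindPrefix, h, hp, ih]

-- ===== VERDICT =====
theorem pick_version_py_spec : Claim_equal_pick_version_py := by
  intro versions wanted _
  unfold Spec_pick_version_py pick_version_py pick_version_py_alt
  cases versions with
  | nil => rfl
  | cons v0 rest =>
    cases wanted with
    | none => rfl
    | some w =>
      by_cases hw : w == ""
      · simp [hw]
      · simp [hw, pvLoopB_none_none]
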